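-- pv_equiv track=rewrite | github.com/dqk0902/DSA_2025 | week2/fastrounds.py | count_rounds
-- ===== SOURCE A (Python) =====
-- def count_rounds(numbers):
--     if not numbers:
--         return 0
--
--     rounds = 0
--     next_expected = 1
--     max_num = max(numbers)
--
--     while next_expected <= max_num:
--         found = False
--         for num in numbers:
--             if num == next_expected:
--                 found = True
--                 next_expected += 1
--         if found:
--             rounds += 1
--
--     return rounds
-- ===== SOURCE B (Python) =====
-- def count_rounds(numbers):
--     if not numbers:
--         return 0
--     max_num = max(numbers)
--     if max_num < 1:
--         return 0
--     # record the (increasing) positions of every value once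
--     pos = {}
--     for i, v in enumerate(numbers):
--         pos.setdefault(v, []).append(i)
--     # walk k = 1..max_num keeping p = position of the last collected value;
--     # a new round starts exactly when no occurrence of k lies after p
--     rounds = 1
--     p = -1
--     for k in range(1, max_num + 1):
--         lst = pos[k]
--         q = None
--         for i in lst:
--             if i > p:
--                 q = i
--                 break
--         if q is not None:
--             p = q
--         else:
--             rounds += 1
--             p = lst[0]
--     return rounds
-- ===== Notes on version B (the rewrite author's own statement) =====
-- stated objective: faster
-- what changed: Instead of re-scanning the whole list once per round, B records each value's positions in one pass and then walks k = 1..max through those position lists, starting a new round exactly when no occurrence of k lies after the last collected position.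
import Mathlib
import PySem

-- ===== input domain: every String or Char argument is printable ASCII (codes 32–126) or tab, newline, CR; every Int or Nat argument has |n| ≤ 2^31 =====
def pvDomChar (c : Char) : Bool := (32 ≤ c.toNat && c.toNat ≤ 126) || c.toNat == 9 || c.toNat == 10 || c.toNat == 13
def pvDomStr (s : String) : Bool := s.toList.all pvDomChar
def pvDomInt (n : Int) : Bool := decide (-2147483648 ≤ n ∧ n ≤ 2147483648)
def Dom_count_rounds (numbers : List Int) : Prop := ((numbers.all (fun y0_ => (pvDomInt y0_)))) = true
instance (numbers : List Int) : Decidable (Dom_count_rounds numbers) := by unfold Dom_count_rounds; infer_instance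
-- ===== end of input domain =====

-- B replaces A's repeated whole-list sweeps by one positions-index pass plus a single walk over 1..max (objective: faster).

-- ===== PORT A =====
-- one sweep of the while-loop body's `for num in numbers` (state = (found, next_expected))
def passA (ns : List Int) (ne : Int) : Bool × Int :=
  ns.foldl (fun st num => if num = st.2 then (true, st.2 + 1) else st) (false, ne)

-- the while-loop; fuel bounds the iteration count (inside Pre_ every pass finds a match, so
-- next_expected strictly increases and max_num + 1 unfoldings reach the exit test)
def loopA (ns : List Int) (mx : Int) : Nat → Int → Int → Int
  | 0, rounds, _ => rounds
  | fuel+1, rounds, ne =>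
    if ne ≤ mx then
      loopA ns mx fuel (if (passA ns ne).1 then rounds + 1 else rounds) (passA ns ne).2
    else rounds

def count_rounds (numbers : List Int) : Int :=
  if numbers = [] then 0
  else
    let mx := (PySem.List.max? numbers (fun x => x)).getD 0
    loopA numbers mx (mx.toNat + 1) 0 1

-- ===== PORT B =====
-- pos.setdefault(v, []).append(i)  ≡  pos[v] = pos.get(v, []) + [i]  =  Dict.modify
def buildPos (ns : List Int) : PySem.Dict Int (List Int) :=
  (PySem.List.enumerate ns 0).foldl (fun d q => d.modify q.2 [] (fun l => l ++ [q.1])) PySem.Dict.empty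

-- B's inner `for i in lst: if i > p: q = i; break`
def findGt : List Int → Int → Option Int
  | [], _ => none
  | i :: rest, p => if p < i then some i else findGt rest p

def count_rounds_alt (numbers : List Int) : Int :=
  if numbers = [] then 0
  else
    let mx := (PySem.List.max? numbers (fun x => x)).getD 0
    if mx < 1 then 0
    else
      let pos := buildPos numbers
      -- pos[k] raises KeyError and lst[0] raises IndexError only when k ∉ numbers, which Pre_ excludes;
      -- getD [] / headD 0 stand in for those raising accesses
      ((PySem.List.pyRange 1 (mx + 1) 1).foldl
        (fun st k =>
          let lst := pos.getD k []
          match findGt lst st.2 with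
          | some q => (st.1, q)
          | none => (st.1 + 1, lst.headD 0)) ((1 : Int), (-1 : Int))).1

-- ===== PRECONDITION & SPEC =====
-- A's while-loop terminates exactly when every value 1..max(numbers) occurs in the list;
-- on the excluded inputs A loops forever (and B raises KeyError), so nothing is claimed there.
def Pre_count_rounds (numbers : List Int) : Prop :=
  (1 ≤ (PySem.List.max? numbers (fun x => x)).getD 0 → 1 ∈ numbers) ∧
  ∀ x ∈ numbers, 1 ≤ x → x < (PySem.List.max? numbers (fun x => x)).getD 0 → x + 1 ∈ numbers
instance (numbers : List Int) : Decidable (Pre_count_rounds numbers) := by unfold Pre_count_rounds; infer_instance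

def pvWitness_count_rounds : List Int := [2, 1, 3, 1]

def Spec_count_rounds (numbers : List Int) (out : Int) : Prop := out = count_rounds_alt numbers
instance (numbers : List Int) (out : Int) : Decidable (Spec_count_rounds numbers out) := by unfold Spec_count_rounds; infer_instance

-- ===== CLAIM (what is proved, stated in full; the proofs are below) =====
def Claim_equal_count_rounds : Prop := ∀ (numbers : List Int), Dom_count_rounds numbers → Pre_count_rounds numbers → Spec_count_rounds numbers (count_rounds numbers)

-- ===== LEMMAS AND PROOFS =====

-- Pre_ says: 1 occurs (when max ≥ 1) and each occurring value x with 1 ≤ x < max is followed by x + 1;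
-- by induction from 1 this is exactly 'every k in 1..max occurs'
theorem pre_mem (ns : List Int) (h : Pre_count_rounds ns) :
    ∀ j : Int, 1 ≤ j → j ≤ (PySem.List.max? ns (fun x => x)).getD 0 → j ∈ ns := by
  obtain ⟨h1, hstep⟩ := h
  intro j hj1
  induction j, hj1 using Int.le_induction with
  | base => intro hle; exact h1 hle
  | succ n hn ih =>
    intro hle
    have hnm : n ∈ ns := ih (by omega)
    exact hstep n hnm (by omega) (by omega)

-- final value of next_expected after one sweep of A starting at k
def gpass : List Int → Int → Int
  | [], k => k
  | x :: t, k => if x = k then gpass t (k + 1) else gpass t k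

-- suffix strictly after the first occurrence of k
def suffAfter : List Int → Int → List Int
  | [], _ => []
  | x :: t, k => if x = k then t else suffAfter t k

-- positions (starting at s) of the occurrences of k
def occE : List Int → Int → Int → List Int
  | [], _, _ => []
  | x :: t, k, s => if x = k then s :: occE t k (s + 1) else occE t k (s + 1)

-- reference greedy walk: k steps 1-by-1, s = suffix after the last collected position
def refR (ns : List Int) : Nat → Int → List Int → Int → Int
  | 0, _, _, r => r
  | n+1, k, s, r =>
    if k ∈ s then refR ns n (k + 1) (suffAfter s k) r
    else refR ns n (k + 1) (suffAfter ns k) (r + 1)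

theorem gpass_le (l : List Int) : ∀ k : Int, k ≤ gpass l k := by
  induction l with
  | nil => intro k; simp [gpass]
  | cons x t ih =>
    intro k
    simp only [gpass]
    split
    · have := ih (k + 1); omega
    · exact ih k

theorem passA_fold (l : List Int) : ∀ (b : Bool) (k : Int),
    l.foldl (fun st num => if num = st.2 then (true, st.2 + 1) else st) (b, k)
      = (b || decide (k < gpass l k), gpass l k) := by
  induction l with
  | nil => intro b k; simp [gpass]
  | cons x t ih =>
    intro b k
    simp only [List.foldl_cons, gpass]
    by_cases h : x = k
    · simp only [h, if_true]
      rw [ih true (k + 1)]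
      have h1 : k < gpass t (k + 1) := lt_of_lt_of_le (by omega) (gpass_le t (k + 1))
      simp [h1]
    · simp only [if_neg h]
      exact ih b k

theorem passA_eq (ns : List Int) (ne : Int) :
    passA ns ne = (decide (ne < gpass ns ne), gpass ns ne) := by
  unfold passA
  rw [passA_fold]
  simp

theorem mem_lt_gpass {l : List Int} {k : Int} (h : k ∈ l) : k < gpass l k := by
  induction l generalizing k with
  | nil => simp at h
  | cons x t ih =>
    simp only [gpass]
    by_cases hx : x = k
    · simp only [if_pos hx]
      exact lt_of_lt_of_le (by omega) (gpass_le t (k + 1))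
    · have hk : k ∈ t := by
        rcases List.mem_cons.1 h with h' | h'
        · exact absurd h'.symm hx
        · exact h'
      simp only [if_neg hx]
      exact ih hk

theorem gpass_char (l : List Int) (k : Int) :
    gpass l k = if k ∈ l then gpass (suffAfter l k) (k + 1) else k := by
  induction l generalizing k with
  | nil => simp [gpass]
  | cons x t ih =>
    by_cases hx : x = k
    · simp [gpass, suffAfter, hx]
    · have hmem : (k ∈ x :: t) = (k ∈ t) := by
        simp only [List.mem_cons, eq_iff_iff, or_iff_right_iff_imp]
        intro h'; exact absurd h'.symm hx
      simp only [gpass, suffAfter, if_neg hx, hmem]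
      exact ih k

theorem occE_append (t1 t2 : List Int) (k : Int) : ∀ s : Int,
    occE (t1 ++ t2) k s = occE t1 k s ++ occE t2 k (s + t1.length) := by
  induction t1 with
  | nil => intro s; simp [occE]
  | cons x t ih =>
    intro s
    have harg : s + ((t.length : Int) + 1) = s + 1 + (t.length : Int) := by ring
    simp only [List.length_cons]
    push_cast
    rw [harg]
    by_cases hx : x = k
    · simp [List.cons_append, occE, if_pos hx, ih (s + 1)]
    · simp [List.cons_append, occE, if_neg hx, ih (s + 1)]

theorem mem_occE (t : List Int) (k : Int) : ∀ (s i : Int), i ∈ occE t k s → s ≤ i ∧ i < s + t.length := by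
  induction t with
  | nil => intro s i h; simp [occE] at h
  | cons x t ih =>
    intro s i h
    simp only [List.length_cons]
    by_cases hx : x = k
    · simp only [occE, if_pos hx, List.mem_cons] at h
      rcases h with h | h
      · subst h
        have : (0 : Int) ≤ (t.length : Int) := by positivity
        push_cast
        omega
      · have := ih (s + 1) i h
        push_cast
        omega
    · simp only [occE, if_neg hx] at h
      have := ih (s + 1) i h
      push_cast
      omega

theorem occE_nil (t : List Int) (k : Int) (h : k ∉ t) : ∀ s : Int, occE t k s = [] := by
  induction t with
  | nil => intro s; simp [occE]
  | cons x t ih =>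
    intro s
    have hx : ¬ x = k := fun h' => h (by simp [h'])
    have ht : k ∉ t := fun h' => h (by simp [h'])
    simp only [occE, if_neg hx]
    exact ih ht (s + 1)

theorem occE_head (t : List Int) (k : Int) (h : k ∈ t) : ∀ s : Int,
    ∃ j : Nat, (occE t k s).head? = some (s + j) ∧ t.drop (j + 1) = suffAfter t k := by
  induction t with
  | nil => simp at h
  | cons x t ih =>
    intro s
    by_cases hx : x = k
    · refine ⟨0, ?_, ?_⟩
      · simp [occE, hx]
      · simp [suffAfter, hx]
    · have hk : k ∈ t := by
        rcases List.mem_cons.1 h with h' | h'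
        · exact absurd h'.symm hx
        · exact h'
      obtain ⟨j, hj1, hj2⟩ := ih hk (s + 1)
      refine ⟨j + 1, ?_, ?_⟩
      · simp only [occE, if_neg hx]
        rw [hj1]
        congr 1
        push_cast
        ring
      · simp only [suffAfter, if_neg hx, List.drop_succ_cons]
        exact hj2

theorem findGt_append (l1 l2 : List Int) (p : Int) (h : ∀ i ∈ l1, i ≤ p) :
    findGt (l1 ++ l2) p = findGt l2 p := by
  induction l1 with
  | nil => simp
  | cons i l1 ih =>
    have hi : i ≤ p := h i (by simp)
    simp only [List.cons_append, findGt, if_neg (by omega : ¬ p < i)]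
    exact ih fun j hj => h j (by simp [hj])

theorem findGt_none (l : List Int) (p : Int) (h : ∀ i ∈ l, i ≤ p) :
    findGt l p = none := by
  have := findGt_append l [] p h
  simpa using this

theorem findGt_head (t : List Int) (k : Int) : ∀ (s p : Int), p < s →
    findGt (occE t k s) p = (occE t k s).head? := by
  induction t with
  | nil => intro s p _; simp [occE, findGt]
  | cons x t ih =>
    intro s p hp
    by_cases hx : x = k
    · simp [occE, hx, findGt, hp]
    · simp only [occE, if_neg hx]
      exact ih (s + 1) p (by omega)

theorem buildPos_aux (k : Int) (ns : List Int) : ∀ (s : Int) (d : PySem.Dict Int (List Int)),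
    ((PySem.List.enumerate ns s).foldl (fun d q => d.modify q.2 [] (fun l => l ++ [q.1])) d).getD k []
      = d.getD k [] ++ occE ns k s := by
  induction ns with
  | nil => intro s d; simp [PySem.List.enumerate_nil, occE]
  | cons x t ih =>
    intro s d
    rw [PySem.List.enumerate_cons]
    simp only [List.foldl_cons]
    rw [ih (s + 1)]
    rw [PySem.Dict.getD_modify]
    by_cases hx : k = x
    · subst hx
      simp [occE, List.append_assoc]
    · rw [if_neg hx]
      simp only [occE, if_neg (fun h : x = k => hx h.symm)]

theorem buildPos_getD (ns : List Int) (k : Int) :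
    (buildPos ns).getD k [] = occE ns k 0 := by
  unfold buildPos
  rw [buildPos_aux]
  simp

theorem chain (ns : List Int) : ∀ (m : Nat) (s : List Int) (k : Int) (n : Nat) (r : Int),
    (gpass s k - k).toNat = m →
    refR ns n k s r = if n ≤ m then r
      else refR ns (n - m - 1) (gpass s k + 1) (suffAfter ns (gpass s k)) (r + 1) := by
  intro m
  induction m using Nat.strong_induction_on with
  | _ m ih =>
    intro s k n r hm
    by_cases hk : k ∈ s
    · have hchar : gpass s k = gpass (suffAfter s k) (k + 1) := by
        rw [gpass_char]; simp [hk]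
      have h1 : k + 1 ≤ gpass (suffAfter s k) (k + 1) := gpass_le _ _
      have hge : k < gpass s k := mem_lt_gpass hk
      have hm1 : 1 ≤ m := by omega
      cases n with
      | zero => simp only [refR, if_pos (Nat.zero_le m)]
      | succ n' =>
        simp only [refR, if_pos hk]
        rw [ih (m - 1) (by omega) (suffAfter s k) (k + 1) n' r (by omega)]
        rw [← hchar]
        by_cases hle : n' + 1 ≤ m
        · rw [if_pos (by omega), if_pos hle]
        · rw [if_neg (by omega), if_neg hle]
          have harith : n' - (m - 1) - 1 = n' + 1 - m - 1 := by omega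
          rw [harith]
    · have hg : gpass s k = k := by rw [gpass_char]; simp [hk]
      have hm0 : m = 0 := by omega
      subst hm0
      cases n with
      | zero => simp [refR]
      | succ n' =>
        simp only [refR, if_neg hk]
        rw [if_neg (by omega), hg]
        have harith : n' + 1 - 0 - 1 = n' := by omega
        rw [harith]

theorem loopA_exit (ns : List Int) (mx : Int) (f : Nat) (r ne : Int) (h : mx < ne) :
    loopA ns mx f r ne = r := by
  cases f with
  | zero => rfl
  | succ f => simp [loopA, show ¬ ne ≤ mx by omega]

theorem refR_loopA (ns : List Int) (mx : Int) (Hpre : ∀ j : Int, 1 ≤ j → j ≤ mx → j ∈ ns) :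
    ∀ (n : Nat) (ne : Int) (r : Int) (f : Nat), n = (mx - ne).toNat → 1 ≤ ne → ne ≤ mx → n ≤ f →
    refR ns n (ne + 1) (suffAfter ns ne) r = loopA ns mx f r (gpass ns ne) := by
  intro n
  induction n using Nat.strong_induction_on with
  | _ n ih =>
    intro ne r f hn h1 h2 hf
    have hne_mem : ne ∈ ns := Hpre ne h1 h2
    have hchar : gpass ns ne = gpass (suffAfter ns ne) (ne + 1) := by
      rw [gpass_char]; simp [hne_mem]
    have hlt : ne < gpass ns ne := mem_lt_gpass hne_mem
    have hle1 : ne + 1 ≤ gpass (suffAfter ns ne) (ne + 1) := gpass_le _ _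
    rw [chain ns ((gpass (suffAfter ns ne) (ne + 1) - (ne + 1)).toNat) (suffAfter ns ne) (ne + 1) n r rfl]
    by_cases hcase : gpass ns ne ≤ mx
    · rw [if_neg (by omega)]
      rw [← hchar]
      have harith : n - (gpass ns ne - (ne + 1)).toNat - 1 = (mx - gpass ns ne).toNat := by
        omega
      rw [harith]
      have hf1 : 1 ≤ f := by omega
      obtain ⟨f', rfl⟩ : ∃ f', f = f' + 1 := ⟨f - 1, by omega⟩
      have hne' : gpass ns ne ∈ ns := Hpre _ (by omega) hcase
      have hlt' : gpass ns ne < gpass ns (gpass ns ne) := mem_lt_gpass hne'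
      simp only [loopA, if_pos hcase, passA_eq, decide_eq_true_eq]
      rw [if_pos hlt']
      exact ih ((mx - gpass ns ne).toNat) (by omega) (gpass ns ne) (r + 1) f' rfl
        (by omega) hcase (by omega)
    · rw [if_pos (by omega)]
      exact (loopA_exit ns mx f r (gpass ns ne) (by omega)).symm

theorem fold_refR (ns : List Int) (mx : Int) (Hpre : ∀ j : Int, 1 ≤ j → j ≤ mx → j ∈ ns) :
    ∀ (n : Nat) (k p r : Int), n = (mx + 1 - k).toNat → 1 ≤ k → -1 ≤ p →
    ((PySem.List.pyRange k (mx + 1) 1).foldl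
        (fun st k' =>
          let lst := (buildPos ns).getD k' []
          match findGt lst st.2 with
          | some q => (st.1, q)
          | none => (st.1 + 1, lst.headD 0)) (r, p)).1
      = refR ns n k (ns.drop ((p + 1).toNat)) r := by
  intro n
  induction n with
  | zero =>
    intro k p r hn h1 hp
    rw [PySem.List.pyRange_one_eq_nil (by omega)]
    simp [refR]
  | succ n ihn =>
    intro k p r hn h1 hp
    have hk : k < mx + 1 := by omega
    rw [PySem.List.pyRange_one_cons hk]
    rw [List.foldl_cons]
    have hcast : (((p + 1).toNat : Nat) : Int) = p + 1 := Int.toNat_of_nonneg (by omega)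
    by_cases hmem : k ∈ ns.drop ((p + 1).toNat)
    · -- k occurs after position p: the inner loop finds the first such occurrence
      have hs_ne : ns.drop ((p + 1).toNat) ≠ [] := List.ne_nil_of_mem hmem
      have hlen_drop : (ns.drop ((p + 1).toNat)).length = ns.length - (p + 1).toNat :=
        List.length_drop
      have hplen : (p + 1).toNat < ns.length := by
        by_contra hcon
        have hz : (ns.drop ((p + 1).toNat)).length = 0 := by omega
        exact hs_ne (List.eq_nil_of_length_eq_zero hz)
      have hlen : (ns.take ((p + 1).toNat)).length = (p + 1).toNat := by
        rw [List.length_take]; omega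
      obtain ⟨j, hj1, hj2⟩ :=
        occE_head (ns.drop ((p + 1).toNat)) k hmem (((p + 1).toNat : Nat) : Int)
      have hocc : occE ns k 0 = occE (ns.take ((p + 1).toNat)) k 0
          ++ occE (ns.drop ((p + 1).toNat)) k (((p + 1).toNat : Nat) : Int) := by
        conv_lhs => rw [← List.take_append_drop ((p + 1).toNat) ns]
        rw [occE_append, hlen, zero_add]
      have hfind : findGt (occE ns k 0) p = some (p + 1 + (j : Int)) := by
        rw [hocc, findGt_append _ _ _ (fun i hi => by
            have hb := mem_occE _ k 0 i hi
            rw [hlen] at hb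
            omega),
          findGt_head _ _ _ _ (by omega), hj1, hcast]
      simp only [buildPos_getD, hfind]
      have hdrop : ns.drop ((p + 1 + (j : Int) + 1).toNat)
          = suffAfter (ns.drop ((p + 1).toNat)) k := by
        rw [← hj2, List.drop_drop]
        congr 1
        omega
      have hrec := ihn (k + 1) (p + 1 + (j : Int)) r (by omega) (by omega) (by omega)
      simp only [buildPos_getD] at hrec
      rw [hdrop] at hrec
      rw [hrec]
      simp only [refR, if_pos hmem]
    · -- k does not occur after p: a new round starts at k's first position
      have hnone : findGt (occE ns k 0) p = none := by
        apply findGt_none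
        intro i hi
        have hocc : occE ns k 0 = occE (ns.take ((p + 1).toNat)) k 0 := by
          conv_lhs => rw [← List.take_append_drop ((p + 1).toNat) ns]
          rw [occE_append, zero_add, occE_nil _ _ hmem, List.append_nil]
        rw [hocc] at hi
        have hb := mem_occE _ k 0 i hi
        have hminle : ((ns.take ((p + 1).toNat)).length : Int) ≤ p + 1 := by
          rw [List.length_take]
          have hml : min ((p + 1).toNat) ns.length ≤ (p + 1).toNat := Nat.min_le_left _ _
          omega
        omega
      have hkns : k ∈ ns := Hpre k h1 (by omega)
      obtain ⟨j0, hj1, hj2⟩ := occE_head ns k hkns 0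
      have hheadD : (occE ns k 0).headD 0 = (j0 : Int) := by
        rcases hocc0 : occE ns k 0 with _ | ⟨a, tl⟩
        · rw [hocc0] at hj1; simp at hj1
        · rw [hocc0] at hj1
          simp only [List.head?_cons, Option.some.injEq] at hj1
          simp [hj1]
      simp only [buildPos_getD, hnone, hheadD]
      have hdrop : ns.drop (((j0 : Int) + 1).toNat) = suffAfter ns k := by
        rw [show ((j0 : Int) + 1).toNat = j0 + 1 by omega, hj2]
      have hrec := ihn (k + 1) (j0 : Int) (r + 1) (by omega) (by omega) (by omega)
      simp only [buildPos_getD] at hrec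
      rw [hdrop] at hrec
      rw [hrec]
      simp only [refR, if_neg hmem]

-- ===== VERDICT (by name: the statement is the Claim_ definition above) =====
theorem count_rounds_spec : Claim_equal_count_rounds := by
  intro ns _ hpre
  unfold Spec_count_rounds count_rounds count_rounds_alt
  by_cases hnil : ns = []
  · simp [hnil]
  · simp only [if_neg hnil]
    have Hpre : ∀ j : Int, 1 ≤ j → j ≤ (PySem.List.max? ns (fun x => x)).getD 0 → j ∈ ns :=
      pre_mem ns hpre
    set mx := (PySem.List.max? ns (fun x => x)).getD 0 with hmx
    clear_value mx
    by_cases hm1 : mx < 1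
    · rw [if_pos hm1]
      have hz : mx.toNat = 0 := by omega
      rw [hz]
      simp [loopA, show ¬ (1 : Int) ≤ mx by omega]
    · rw [if_neg hm1]
      push_neg at hm1
      have h1mem : (1 : Int) ∈ ns := Hpre 1 le_rfl hm1
      have hlt1 : (1 : Int) < gpass ns 1 := mem_lt_gpass h1mem
      rw [fold_refR ns mx Hpre mx.toNat 1 (-1) 1 (by omega) le_rfl (by omega)]
      rw [show ((-1 : Int) + 1).toNat = 0 from rfl, List.drop_zero]
      obtain ⟨t, ht⟩ : ∃ t, mx.toNat = t + 1 := ⟨mx.toNat - 1, by omega⟩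
      rw [ht]
      simp only [refR, if_pos h1mem]
      rw [refR_loopA ns mx Hpre t 1 1 (t + 1) (by omega) le_rfl hm1 (by omega)]
      have hunfold : loopA ns mx (t + 1 + 1) 0 1
          = if (1 : Int) ≤ mx then
              loopA ns mx (t + 1) (if (passA ns 1).1 then 0 + 1 else 0) (passA ns 1).2
            else 0 := rfl
      rw [hunfold, if_pos hm1, passA_eq]
      simp only [decide_eq_true_eq]
      rw [if_pos hlt1]
      norm_num
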